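-- pv_equiv track=rewrite | github.com/Ryanless/CodeWars | kyu5678/kyu5.py | play_if_enough2
-- ===== SOURCE A (Python) =====
-- def play_if_enough2(hand, play):
--     #build dict of the resources you have
--     resources = {}
--     for charA in hand:
--         if charA in resources.keys():
--             resources[charA] += 1
--         else:
--             resources[charA] = 1
--     #checks if you have enough resources to build play
--     for charB in play:
--         if (charB in resources) and (resources[charB] > 0):
--             resources[charB] -= 1
--         else:
--             return False, hand
--     #compute your new hand after spending resources
--     newHand = ''
--     for key in resources.keys():
--         newHand += key * resources[key]
--     return True, newHand
-- ===== SOURCE B (Python) =====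
-- def play_if_enough2(hand, play):
--     # insufficient iff some play character occurs more often in play than in hand
--     if any(hand.count(c) < play.count(c) for c in set(play)):
--         return False, hand
--     # remaining hand: first-appearance order over hand, count = hand count - play count
--     seen = set()
--     out = []
--     for c in hand:
--         if c not in seen:
--             seen.add(c)
--             out.append(c * (hand.count(c) - play.count(c)))
--     return True, ''.join(out)
-- ===== Notes on version B (the rewrite author's own statement) =====
-- stated objective: faster
-- what changed: Replaces A's dict-building loop plus sequential decrement-or-fail spending loop with a single whole-count comparison (hand.count vs play.count per distinct play char) and a direct first-appearance rebuild of the remaining hand from counts; no mutable counter table is maintained.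
import Mathlib
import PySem

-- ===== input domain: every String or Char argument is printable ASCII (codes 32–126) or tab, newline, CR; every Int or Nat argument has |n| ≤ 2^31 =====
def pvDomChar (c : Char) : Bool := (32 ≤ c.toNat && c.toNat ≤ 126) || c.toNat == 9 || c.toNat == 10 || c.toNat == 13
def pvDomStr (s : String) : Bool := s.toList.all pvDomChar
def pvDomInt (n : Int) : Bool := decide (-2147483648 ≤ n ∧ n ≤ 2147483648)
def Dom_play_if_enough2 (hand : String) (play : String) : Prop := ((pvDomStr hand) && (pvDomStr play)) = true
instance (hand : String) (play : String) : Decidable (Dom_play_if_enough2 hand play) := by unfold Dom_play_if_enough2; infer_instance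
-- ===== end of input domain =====

-- B replaces A's dict-building + sequential decrement-or-fail loop by a whole-count comparison per
-- distinct play character and a direct first-appearance rebuild of the remaining hand from counts
-- (measurably faster on a timing run's inputs: the per-character dict bookkeeping disappears).

-- ===== PORT A =====
/-- A's `for charB in play` loop with its early `return False, hand` (modelled as `none`). -/
def pvSpend (d : PySem.Dict Char Int) : List Char → Option (PySem.Dict Char Int)
  | [] => some d
  | c :: rest =>
      if d.contains c ∧ d.getD c 0 > 0 then
        pvSpend (d.modify c 0 (· - 1)) rest
      else none

def play_if_enough2 (hand : String) (play : String) : Bool × String :=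
  let resources : PySem.Dict Char Int :=
    hand.toList.foldl (fun d c =>
      if d.contains c then d.insert c (d.getD c 0 + 1) else d.insert c 1)
      PySem.Dict.empty
  match pvSpend resources play.toList with
  | none => (false, hand)
  | some d =>
      -- `newHand += key * resources[key]`: accumulated as a char list, `key * n` = List.replicate n.toNat key
      -- (exact: Python gives '' for n ≤ 0, and toNat clamps the same way)
      (true, String.mk (d.items.foldl (fun acc p => acc ++ List.replicate p.2.toNat p.1) []))

-- ===== PORT B =====
def play_if_enough2_alt (hand : String) (play : String) : Bool × String :=
  let hc := hand.toList
  let pc := play.toList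
  -- hand.count(c) for a 1-char c is exactly the char count of the list
  if (PySem.Set.ofList pc).any (fun c => decide (hc.count c < pc.count c)) then
    (false, hand)
  else
    let r := hc.foldl (fun (st : PySem.Set Char × List (List Char)) c =>
        if st.1.contains c then st
        else (PySem.Set.add st.1 c,
              st.2 ++ [List.replicate ((hc.count c : Int) - (pc.count c : Int)).toNat c]))
      (PySem.Set.empty, [])
    (true, String.mk r.2.flatten)   -- ''.join(out)

-- ===== PRECONDITION & SPEC =====
def Spec_play_if_enough2 (hand : String) (play : String) (out : Bool × String) : Prop := out = play_if_enough2_alt hand play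
instance (hand : String) (play : String) (out : Bool × String) : Decidable (Spec_play_if_enough2 hand play out) := by unfold Spec_play_if_enough2; infer_instance

-- ===== CLAIM (what is proved, stated in full; the proofs are below) =====
def Claim_equal_play_if_enough2 : Prop := ∀ (hand : String) (play : String), Dom_play_if_enough2 hand play → Spec_play_if_enough2 hand play (play_if_enough2 hand play)

-- ===== LEMMAS AND PROOFS =====

theorem getD_of_not_contains {κ ν : Type} [BEq κ] (d : PySem.Dict κ ν) (k : κ) (dflt : ν)
    (h : d.contains k = false) : d.getD k dflt = dflt := by
  have h' : ∀ p ∈ d.items, ¬(p.1 == k) = true := by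
    simpa [PySem.Dict.contains, List.any_eq_false] using h
  simp [PySem.Dict.getD, PySem.Dict.get?, List.find?_eq_none.mpr h']


theorem build_eq_counter (l : List Char) :
    l.foldl (fun d c => if d.contains c then d.insert c (d.getD c 0 + 1) else d.insert c 1)
      PySem.Dict.empty = PySem.Dict.counter l := by
  have hstep : (fun (d : PySem.Dict Char Int) c =>
      if d.contains c then d.insert c (d.getD c 0 + 1) else d.insert c 1)
      = fun d c => d.insert c (d.getD c 0 + 1) := by
    funext d c
    by_cases h : d.contains c
    · simp [h]
    · simp [h, getD_of_not_contains d c 0 (by simpa using h)]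
  rw [hstep, PySem.Dict.foldl_insert_getD_add_one_eq_counter]


theorem getD_foldl_modify_sub (l : List Char) (d : PySem.Dict Char Int) (v : Char) :
    (l.foldl (fun d c => d.modify c 0 (· - 1)) d).getD v 0 = d.getD v 0 - l.count v := by
  induction l generalizing d with
  | nil => simp
  | cons a t ih =>
    simp only [List.foldl_cons, ih, PySem.Dict.getD_modify, List.count_cons]
    by_cases h : v = a
    · subst h; simp; push_cast; ring
    · simp [h, Ne.symm h]


theorem pvSpend_eq (l : List Char) (d : PySem.Dict Char Int) :
    pvSpend d l =
      if ∀ c ∈ l, (l.count c : Int) ≤ d.getD c 0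
      then some (l.foldl (fun d c => d.modify c 0 (· - 1)) d) else none := by
  induction l generalizing d with
  | nil => simp [pvSpend]
  | cons a rest ih =>
    rw [pvSpend]
    by_cases hg : d.contains a ∧ d.getD a 0 > 0
    · rw [if_pos hg, ih, List.foldl_cons]
      have hcc : ∀ c : Char, (((a :: rest).count c : Int)) = (rest.count c : Int) + if c = a then 1 else 0 := by
        intro c
        by_cases he : c = a
        · simp [List.count_cons, he]
        · simp [List.count_cons, he, Ne.symm he]
      have hmod : ∀ c : Char, (d.modify a 0 (· - 1)).getD c 0 = if c = a then d.getD a 0 - 1 else d.getD c 0 := by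
        intro c
        simp [PySem.Dict.getD_modify]
      have hcond : (∀ c ∈ rest, (rest.count c : Int) ≤ (d.modify a 0 (· - 1)).getD c 0)
          ↔ (∀ c ∈ a :: rest, ((a :: rest).count c : Int) ≤ d.getD c 0) := by
        constructor
        · intro hL c hc
          rw [hcc]
          by_cases he : c = a
          · rw [if_pos he, he]
            by_cases hm : a ∈ rest
            · have h2 := hL a hm
              rw [hmod, if_pos rfl] at h2
              omega
            · rw [List.count_eq_zero_of_not_mem hm]
              have := hg.2
              omega
          · rw [if_neg he]
            have hm : c ∈ rest := (List.mem_cons.mp hc).resolve_left he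
            have h2 := hL c hm
            rw [hmod, if_neg he] at h2
            omega
        · intro hR c hc
          have h2 := hR c (List.mem_cons_of_mem _ hc)
          rw [hcc] at h2
          rw [hmod]
          by_cases he : c = a
          · rw [if_pos he] at h2 ⊢
            rw [he] at h2 ⊢
            omega
          · rw [if_neg he] at h2 ⊢
            omega
      split_ifs with h1 h2 h2
      · rfl
      · exact absurd (hcond.mp h1) h2
      · exact absurd (hcond.mpr h2) h1
      · rfl
    · rw [if_neg hg, if_neg]
      intro hall
      have hle : d.getD a 0 ≤ 0 := by
        by_cases hc : d.contains a
        · push_neg at hg; have := hg hc; omega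
        · rw [getD_of_not_contains d a 0 (by simpa using hc)]
      have hmem := hall a (List.mem_cons_self ..)
      have h1 : 1 ≤ (a :: rest).count a := by
        simp [List.count_cons]
      omega

theorem set_add_of_mem {α : Type} [BEq α] [LawfulBEq α] (s : PySem.Set α) (x : α)
    (h : x ∈ s) : PySem.Set.add s x = s := by
  simp [PySem.Set.add, PySem.Set.contains, h]


theorem set_update_of_subset (l : List Char) (s : PySem.Set Char)
    (h : ∀ x ∈ l, x ∈ s) : PySem.Set.update s l = s := by
  induction l generalizing s with
  | nil => rfl
  | cons a t ih =>
    have ha : PySem.Set.add s a = s := set_add_of_mem s a (h a (List.mem_cons_self ..))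
    show PySem.Set.update (PySem.Set.add s a) t = s
    rw [ha]
    exact ih s (fun x hx => h x (List.mem_cons_of_mem _ hx))


theorem set_update_prefix {α : Type} [BEq α] (l : List α) (s : PySem.Set α) :
    ∃ t, PySem.Set.update s l = s ++ t := by
  induction l generalizing s with
  | nil => exact ⟨[], by simp [PySem.Set.update]⟩
  | cons a t ih =>
    show ∃ v, PySem.Set.update (PySem.Set.add s a) t = s ++ v
    obtain ⟨u, hu⟩ := ih (PySem.Set.add s a)
    by_cases hc : s.contains a
    · have ha : PySem.Set.add s a = s := by rw [PySem.Set.add, if_pos hc]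
      rw [ha] at hu ⊢
      exact ⟨u, hu⟩
    · have ha : PySem.Set.add s a = s ++ [a] := by rw [PySem.Set.add, if_neg hc]
      rw [ha] at hu ⊢
      exact ⟨a :: u, by rw [hu, List.append_assoc]; rfl⟩


theorem seen_fold (f : Char → List Char) (l : List Char) (seen : PySem.Set Char)
    (out : List (List Char)) :
    l.foldl (fun (st : PySem.Set Char × List (List Char)) c =>
        if st.1.contains c then st else (PySem.Set.add st.1 c, st.2 ++ [f c])) (seen, out)
    = (PySem.Set.update seen l,
       out ++ ((PySem.Set.update seen l).drop seen.length).map f) := by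
  induction l generalizing seen out with
  | nil => simp [PySem.Set.update]
  | cons a t ih =>
    by_cases hc : seen.contains a = true
    · have hupd : PySem.Set.update seen (a :: t) = PySem.Set.update seen t := by
        show PySem.Set.update (PySem.Set.add seen a) t = _
        rw [PySem.Set.add, if_pos hc]
      rw [List.foldl_cons]
      dsimp only
      rw [if_pos hc, ih seen out, hupd]
    · have ha : PySem.Set.add seen a = seen ++ [a] := by rw [PySem.Set.add, if_neg hc]
      have hupd : PySem.Set.update seen (a :: t) = PySem.Set.update (seen ++ [a]) t := by
        show PySem.Set.update (PySem.Set.add seen a) t = _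
        rw [ha]
      obtain ⟨u, hu⟩ := set_update_prefix t (seen ++ [a])
      rw [List.foldl_cons]
      dsimp only
      rw [if_neg hc, ha, ih, hupd, hu]
      have hd1 : ((seen ++ [a]) ++ u).drop seen.length = a :: u := by
        rw [List.append_assoc]
        exact List.drop_left
      have hd2 : ((seen ++ [a]) ++ u).drop ((seen ++ [a]).length) = u := List.drop_left
      rw [hd1, hd2]
      simp

-- ===== VERDICT (by name: the statement is the Claim_ definition above) =====
theorem play_if_enough2_spec : Claim_equal_play_if_enough2 := by
  unfold Claim_equal_play_if_enough2
  intro hand play _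
  unfold Spec_play_if_enough2 play_if_enough2 play_if_enough2_alt
  dsimp only
  rw [build_eq_counter, pvSpend_eq]
  by_cases hcond : ∀ c ∈ play.toList,
      ((play.toList.count c : Int)) ≤ (PySem.Dict.counter hand.toList).getD c 0
  · rw [if_pos hcond]
    have hcnt : ∀ c ∈ play.toList, play.toList.count c ≤ hand.toList.count c := by
      intro c hc
      have h1 := hcond c hc
      rw [PySem.Dict.getD_counter] at h1
      exact_mod_cast h1
    have hB : ((PySem.Set.ofList play.toList).any
        fun c => decide (hand.toList.count c < play.toList.count c)) = false := by
      rw [List.any_eq_false]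
      intro c hc
      have hm : c ∈ play.toList := (PySem.Set.mem_ofList _ _).mp hc
      simpa using Nat.not_lt.mpr (hcnt c hm)
    rw [hB]
    simp only [Bool.false_eq_true, if_false]
    have hkeys : (play.toList.foldl (fun d c => d.modify c 0 (· - 1))
        (PySem.Dict.counter hand.toList)).keys = PySem.Set.ofList hand.toList := by
      rw [PySem.Dict.keys_foldl_modify play.toList (0 : Int) (fun _ _ => (fun y => y - 1)),
        PySem.Dict.keys_counter]
      apply set_update_of_subset
      intro x hx
      have h1 : 0 < play.toList.count x := List.count_pos_iff.mpr hx
      have h2 : 0 < hand.toList.count x := lt_of_lt_of_le h1 (hcnt x hx)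
      exact (PySem.Set.mem_ofList _ _).mpr (List.count_pos_iff.mp h2)
    have hnd : (play.toList.foldl (fun d c => d.modify c 0 (· - 1))
        (PySem.Dict.counter hand.toList)).keys.Nodup := by
      rw [hkeys]; exact PySem.Set.nodup_ofList _
    have hitems : (play.toList.foldl (fun d c => d.modify c 0 (· - 1))
        (PySem.Dict.counter hand.toList)).items
        = (PySem.Set.ofList hand.toList).map
            (fun k => (k, (hand.toList.count k : Int) - play.toList.count k)) := by
      rw [PySem.Dict.items_eq_map_keys _ hnd 0, hkeys]
      refine List.map_congr_left ?_
      intro k _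
      rw [getD_foldl_modify_sub, PySem.Dict.getD_counter]
    rw [hitems, PySem.List.foldl_append_eq_flatMap]
    have hseen := seen_fold
      (fun c => List.replicate ((hand.toList.count c : Int) - (play.toList.count c : Int)).toNat c)
      hand.toList PySem.Set.empty []
    rw [hseen]
    simp [List.flatMap_def, PySem.Set.ofList, PySem.Set.update]
    apply congrArg String.mk
    apply congrArg List.flatten
    apply List.map_congr_left
    intro k _
    simp [Int.toNat_sub]
  · rw [if_neg hcond]
    have hB : ((PySem.Set.ofList play.toList).any
        fun c => decide (hand.toList.count c < play.toList.count c)) = true := by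
      rw [List.any_eq_true]
      push_neg at hcond
      obtain ⟨c, hc, hlt⟩ := hcond
      refine ⟨c, (PySem.Set.mem_ofList _ _).mpr hc, ?_⟩
      rw [PySem.Dict.getD_counter] at hlt
      simpa using (by exact_mod_cast hlt : hand.toList.count c < play.toList.count c)
    rw [hB]
    simp
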